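-- pv_equiv track=rewrite | github.com/No1tan1ts3d/Combine_log_and_coderefractor | kernel_utils.py | add_kernel_includes
-- ===== SOURCE A (Python) =====
-- def add_kernel_includes(code: str, is_kernel_driver: bool) -> str:
--     """Add necessary kernel includes if this is kernel driver code"""
--     if not is_kernel_driver:
--         return code
--     if '#include <linux/kernel.h>' in code:
--         return code
--     lines = code.split('\n')
--     insert_index = 0
--     for i, line in enumerate(lines):
--         if line.strip().startswith('#include'):
--             insert_index = i + 1
--         elif line.strip() and not line.strip().startswith('//') and not line.strip().startswith('/*'):
--             break
--     kernel_includes = [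
--         '#include <linux/kernel.h>',
--         '#include <linux/module.h>',
--         '#include <linux/kthread.h>'
--     ]
--     lines[insert_index:insert_index] = kernel_includes
--     return '\n'.join(lines)
-- ===== SOURCE B (Python) =====
-- KERNEL_INCLUDES = [
--     '#include <linux/kernel.h>',
--     '#include <linux/module.h>',
--     '#include <linux/kthread.h>',
-- ]
--
--
-- def _is_include(line):
--     return line.strip().startswith('#include')
--
--
-- def _is_code(line):
--     s = line.strip()
--     return (bool(s) and not s.startswith('#include')
--             and not s.startswith('//') and not s.startswith('/*'))
--
--
-- def add_kernel_includes(code: str, is_kernel_driver: bool) -> str: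
--     """Add necessary kernel includes if this is kernel driver code"""
--     if not is_kernel_driver:
--         return code
--     if '#include <linux/kernel.h>' in code:
--         return code
--     lines = code.split('\n')
--     boundary = next((i for i, l in enumerate(lines) if _is_code(l)), len(lines))
--     prefix = lines[:boundary]
--     idx = next((i + 1 for i, l in reversed(list(enumerate(prefix)))
--                 if _is_include(l)), 0)
--     return '\n'.join(prefix[:idx] + KERNEL_INCLUDES + prefix[idx:] + lines[boundary:])
-- ===== Notes on version B (the rewrite author's own statement) =====
-- stated objective: alternative
-- what changed: Replaces A's single stateful scan (mutable insert_index updated inside a loop with break) by a two-phase decomposition: first find the header boundary (first real code line), then find one past the last #include within that prefix by a reversed-enumerate search, and splice the includes there.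
import Mathlib
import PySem

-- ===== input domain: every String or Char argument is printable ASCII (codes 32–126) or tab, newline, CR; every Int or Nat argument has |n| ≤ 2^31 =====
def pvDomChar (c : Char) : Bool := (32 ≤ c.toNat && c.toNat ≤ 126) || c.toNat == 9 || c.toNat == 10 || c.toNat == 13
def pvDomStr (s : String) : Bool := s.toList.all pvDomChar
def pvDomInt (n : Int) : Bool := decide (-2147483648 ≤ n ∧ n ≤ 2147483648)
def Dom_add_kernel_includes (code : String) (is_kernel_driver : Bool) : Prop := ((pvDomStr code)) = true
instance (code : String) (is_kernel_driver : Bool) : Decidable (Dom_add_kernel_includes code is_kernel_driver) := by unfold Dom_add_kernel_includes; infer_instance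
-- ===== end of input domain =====

-- B replaces A's single stateful loop by a two-phase scan (header boundary, then last #include in that prefix); alternative decomposition, same cost.

-- the kernel_includes literal both sources contain
def kernelIncludesList : List String :=
  ["#include <linux/kernel.h>", "#include <linux/module.h>", "#include <linux/kthread.h>"]

-- ===== PORT A =====
-- A's for-loop with mutable insert_index and break, as structural recursion
-- over the lines carrying (i, insert_index)
def akiLoop : List String → Nat → Nat → Nat
  | [], _, acc => acc
  | l :: ls, i, acc =>
    if PySem.Str.startswith (PySem.Str.strip l) "#include" then akiLoop ls (i + 1) (i + 1)
    else if PySem.Str.strip l != "" && !PySem.Str.startswith (PySem.Str.strip l) "//"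
            && !PySem.Str.startswith (PySem.Str.strip l) "/*" then acc
    else akiLoop ls (i + 1) acc

def add_kernel_includes (code : String) (is_kernel_driver : Bool) : String :=
  if !is_kernel_driver then code
  else if PySem.Str.isIn "#include <linux/kernel.h>" code then code
  else
    -- code.split('\n'); the separator is the nonempty literal "\n", so split? is
    -- always `some` here and the `.getD []` default is unreachable
    let lines := (PySem.Str.split? code "\n").getD []
    let insert_index := akiLoop lines 0 0
    -- lines[insert_index:insert_index] = kernel_includes; '\n'.join(lines)
    PySem.Str.join "\n" (lines.take insert_index ++ kernelIncludesList ++ lines.drop insert_index)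

-- ===== PORT B =====
-- _is_include(line)
def incLine (l : String) : Bool := PySem.Str.startswith (PySem.Str.strip l) "#include"

def isCodeLine (line : String) : Bool :=
  let s := PySem.Str.strip line
  s != "" && !PySem.Str.startswith s "#include"
    && !PySem.Str.startswith s "//" && !PySem.Str.startswith s "/*"

def add_kernel_includes_alt (code : String) (is_kernel_driver : Bool) : String :=
  if !is_kernel_driver then code
  else if PySem.Str.isIn "#include <linux/kernel.h>" code then code
  else
    let lines := (PySem.Str.split? code "\n").getD []   -- same split, "\n" ≠ "" so always `some`
    -- next((i for i, l in enumerate(lines) if _is_code(l)), len(lines)):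
    -- List.findIdx returns the length when no element matches
    let boundary := lines.findIdx isCodeLine
    let pre := lines.take boundary
    -- next((i + 1 for i, l in reversed(list(enumerate(prefix))) if ...), 0);
    -- the enumerate index is a nonnegative Int, so .toNat is exact
    let idx := match (PySem.List.enumerate pre 0).reverse.find?
        (fun p => incLine p.2) with
      | some p => (p.1 + 1).toNat
      | none => 0
    PySem.Str.join "\n" (pre.take idx ++ kernelIncludesList ++ pre.drop idx ++ lines.drop boundary)

-- ===== PRECONDITION & SPEC =====
def Spec_add_kernel_includes (code : String) (is_kernel_driver : Bool) (out : String) : Prop := out = add_kernel_includes_alt code is_kernel_driver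
instance (code : String) (is_kernel_driver : Bool) (out : String) : Decidable (Spec_add_kernel_includes code is_kernel_driver out) := by unfold Spec_add_kernel_includes; infer_instance

-- ===== CLAIM (what is proved, stated in full; the proofs are below) =====
def Claim_equal_add_kernel_includes : Prop := ∀ (code : String) (is_kernel_driver : Bool), Dom_add_kernel_includes code is_kernel_driver → Spec_add_kernel_includes code is_kernel_driver (add_kernel_includes code is_kernel_driver)

-- ===== LEMMAS AND PROOFS =====

-- proof-only abbreviations for A's two line predicates
def restLine (l : String) : Bool :=
  PySem.Str.strip l != "" && !PySem.Str.startswith (PySem.Str.strip l) "//"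
    && !PySem.Str.startswith (PySem.Str.strip l) "/*"

-- relative result of A's loop: one past the last #include before the boundary, if any
def relIdx : List String → Option Nat
  | [] => none
  | l :: ls =>
    if incLine l then some ((relIdx ls).getD 0 + 1)
    else if restLine l then none
    else (relIdx ls).map (· + 1)

-- one past the last #include of a whole list, if any
def lastInc : List String → Option Nat
  | [] => none
  | l :: ls =>
    match lastInc ls with
    | some k => some (k + 1)
    | none => if incLine l then some 1 else none

theorem isCodeLine_eq (l : String) : isCodeLine l = (!incLine l && restLine l) := by
  simp only [isCodeLine, incLine, restLine]
  cases h1 : PySem.Str.strip l != "" <;>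
    cases h2 : PySem.Str.startswith (PySem.Str.strip l) "#include" <;>
      cases h3 : PySem.Str.startswith (PySem.Str.strip l) "//" <;>
        cases h4 : PySem.Str.startswith (PySem.Str.strip l) "/*" <;> simp [h1, h2, h3, h4]

theorem akiLoop_cons (l : String) (ls : List String) (i acc : Nat) :
    akiLoop (l :: ls) i acc =
      if incLine l then akiLoop ls (i + 1) (i + 1)
      else if restLine l then acc else akiLoop ls (i + 1) acc := rfl

theorem akiLoop_eq : ∀ (lines : List String) (i acc : Nat),
    akiLoop lines i acc = match relIdx lines with | some k => i + k | none => acc := by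
  intro lines
  induction lines with
  | nil => intro i acc; rfl
  | cons l ls ih =>
    intro i acc
    rw [akiLoop_cons]
    by_cases h1 : incLine l = true
    · rw [if_pos h1, ih]
      simp only [relIdx, h1, if_true]
      cases hr : relIdx ls with
      | some k => show i + 1 + k = i + (k + 1); ring
      | none => rfl
    · rw [if_neg (by simpa using h1)]
      have h1f : incLine l = false := by simpa using h1
      by_cases h2 : restLine l = true
      · rw [if_pos h2]
        simp only [relIdx, h1f, h2, Bool.false_eq_true, if_false, if_true]
      · have h2f : restLine l = false := by simpa using h2
        rw [if_neg (by simpa using h2), ih]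
        simp only [relIdx, h1f, h2f, Bool.false_eq_true, if_false]
        cases hr : relIdx ls with
        | some k => show i + 1 + k = i + (k + 1); ring
        | none => rfl

theorem lastInc_le : ∀ (lines : List String) (k : Nat), lastInc lines = some k → k ≤ lines.length := by
  intro lines
  induction lines with
  | nil => intro k h; simp [lastInc] at h
  | cons l ls ih =>
    intro k h
    simp only [lastInc] at h
    cases hls : lastInc ls with
    | some m =>
      rw [hls] at h; have := ih m hls
      simp only [Option.some.injEq] at h
      simp only [List.length_cons]
      omega
    | none =>
      rw [hls] at h
      by_cases hI : incLine l = true <;> simp [hI] at h <;> simp [List.length_cons] <;> omega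
      

theorem relIdx_eq_lastInc_take : ∀ (lines : List String),
    relIdx lines = lastInc (lines.take (lines.findIdx isCodeLine)) := by
  intro lines
  induction lines with
  | nil => rfl
  | cons l ls ih =>
    by_cases h1 : incLine l = true
    · have hc : isCodeLine l = false := by rw [isCodeLine_eq, h1]; rfl
      rw [List.findIdx_cons, hc]
      simp only [cond_false, List.take_succ_cons, relIdx, h1, if_true, lastInc, ← ih]
      cases relIdx ls <;> rfl
    · have h1f : incLine l = false := by simpa using h1
      by_cases h2 : restLine l = true
      · have hc : isCodeLine l = true := by rw [isCodeLine_eq, h1f, h2]; rfl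
        rw [List.findIdx_cons, hc]
        simp only [cond_true, List.take_zero, relIdx, h1f, h2, lastInc]
        simp
      · have h2f : restLine l = false := by simpa using h2
        have hc : isCodeLine l = false := by rw [isCodeLine_eq, h1f, h2f]; simp
        rw [List.findIdx_cons, hc]
        simp only [cond_false, List.take_succ_cons, relIdx, h1f, h2f, lastInc, ← ih]
        cases relIdx ls <;> simp [h1f]

theorem revFind_fst : ∀ (lines : List String) (s : Int),
    (((PySem.List.enumerate lines s).reverse.find?
        (fun p => incLine p.2)).map Prod.fst)
      = (lastInc lines).map (fun k : Nat => s + (k : Int) - 1) := by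
  intro lines
  induction lines with
  | nil => intro s; simp [PySem.List.enumerate_nil, lastInc]
  | cons l ls ih =>
    intro s
    rw [PySem.List.enumerate_cons, List.reverse_cons, List.find?_append]
    cases hls : lastInc ls with
    | some k =>
      have h := ih (s + 1)
      rw [hls] at h
      simp only [Option.map_some] at h
      obtain ⟨p, hp, hfst⟩ := Option.map_eq_some_iff.mp h
      rw [hp, Option.some_or]
      simp only [lastInc, hls, Option.map_some, Option.some.injEq]
      rw [hfst]
      push_cast
      ring
    | none =>
      have h := ih (s + 1)
      rw [hls] at h
      have hnone : ((PySem.List.enumerate ls (s + 1)).reverse.find?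
          (fun p => incLine p.2)) = none := by
        cases hf : ((PySem.List.enumerate ls (s + 1)).reverse.find?
            (fun p => incLine p.2)) with
        | none => rfl
        | some q => rw [hf] at h; simp at h
      rw [hnone, Option.none_or]
      simp only [lastInc, hls]
      cases hf : List.find? (fun p => incLine p.2) [((s : Int), l)] with
      | none =>
        have hnp : ¬ (fun p => incLine p.2) ((s : Int), l) = true :=
          List.find?_eq_none.mp hf _ (List.mem_singleton_self _)
        have hIf : incLine l = false := by
          cases hb : incLine l
          · rfl
          · exact absurd (hb : (fun p => incLine p.2) ((s : Int), l) = true) hnp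
        rw [hIf]
        simp only [Bool.false_eq_true, if_false, Option.map_none]
      | some q =>
        have hmem := List.mem_of_find?_eq_some hf
        have hq : q = ((s : Int), l) := by simpa using hmem
        have hpq := List.find?_some hf
        rw [hq] at hpq
        have hI : incLine l = true := hpq
        rw [hq, hI, if_pos rfl]
        simp only [Option.map_some, Option.some.injEq]
        show s = s + ((1 : Nat) : Int) - 1
        push_cast
        ring
-- both ports splice at the same index; stated over the (shared) split line list
theorem main_lines (lines : List String) :
    PySem.Str.join "\n" (lines.take (akiLoop lines 0 0) ++ kernelIncludesList
      ++ lines.drop (akiLoop lines 0 0))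
    = PySem.Str.join "\n"
        ((lines.take (lines.findIdx isCodeLine)).take
            (match (PySem.List.enumerate (lines.take (lines.findIdx isCodeLine)) 0).reverse.find?
                (fun p => incLine p.2) with
              | some p => (p.1 + 1).toNat
              | none => 0)
          ++ kernelIncludesList
          ++ (lines.take (lines.findIdx isCodeLine)).drop
            (match (PySem.List.enumerate (lines.take (lines.findIdx isCodeLine)) 0).reverse.find?
                (fun p => incLine p.2) with
              | some p => (p.1 + 1).toNat
              | none => 0)
          ++ lines.drop (lines.findIdx isCodeLine)) := by
  set B := lines.findIdx isCodeLine with hB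
  set pre := lines.take B with hpre
  -- B's idx equals (lastInc pre).getD 0
  have hidx : (match (PySem.List.enumerate pre 0).reverse.find?
      (fun p => incLine p.2) with
      | some p => (p.1 + 1).toNat
      | none => 0) = (lastInc pre).getD 0 := by
    have h := revFind_fst pre 0
    cases hL : lastInc pre with
    | none =>
      rw [hL] at h
      cases hf : (PySem.List.enumerate pre 0).reverse.find?
          (fun p => incLine p.2) with
      | none => rfl
      | some q => rw [hf] at h; simp at h
    | some k =>
      rw [hL] at h
      simp only [Option.map_some] at h
      obtain ⟨p, hp, hfst⟩ := Option.map_eq_some_iff.mp h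
      rw [hp]
      simp only [Option.getD_some]
      rw [hfst]
      have h9 : (0 : Int) + (k : Int) - 1 + 1 = (k : Int) := by ring
      rw [h9]
      simp
  -- A's index equals the same value
  have hA : akiLoop lines 0 0 = (lastInc pre).getD 0 := by
    rw [akiLoop_eq, relIdx_eq_lastInc_take, ← hB, ← hpre]
    cases lastInc pre <;> simp
  rw [hidx, hA]
  set n := (lastInc pre).getD 0 with hn
  -- n ≤ B
  have hnB : n ≤ B := by
    cases hL : lastInc pre with
    | none => rw [hn, hL]; exact Nat.zero_le _
    | some k =>
      have := lastInc_le pre k hL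
      have hlen : pre.length ≤ B := by rw [hpre]; simp [List.length_take]
      rw [hn, hL]
      simp only [Option.getD_some]
      omega
  congr 1
  -- list identity: take n ++ KI ++ drop n = pre.take n ++ KI ++ pre.drop n ++ drop B
  have h1 : pre.take n = lines.take n := by
    rw [hpre, List.take_take, min_eq_left hnB]
  have h2 : pre.drop n ++ lines.drop B = lines.drop n := by
    rw [hpre, List.drop_take]
    have : lines.drop B = (lines.drop n).drop (B - n) := by
      rw [List.drop_drop]; congr 1; omega
    rw [this, List.take_append_drop]
  rw [h1, List.append_assoc, List.append_assoc, h2, ← List.append_assoc]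

-- ===== VERDICT (by name: the statement is the Claim_ definition above) =====
set_option maxHeartbeats 1000000 in
theorem add_kernel_includes_spec : Claim_equal_add_kernel_includes := by
  intro code ik _
  show add_kernel_includes code ik = add_kernel_includes_alt code ik
  unfold add_kernel_includes add_kernel_includes_alt
  cases ik with
  | false => show code = code; rfl
  | true =>
    cases hIn : PySem.Str.isIn "#include <linux/kernel.h>" code with
    | true => simp only [Bool.not_true, Bool.false_eq_true, if_false, if_true]
    | false =>
      simp only [Bool.not_true, Bool.false_eq_true, if_false]
      exact main_lines ((PySem.Str.split? code "\n").getD [])
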